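-- pv_equiv track=rewrite | github.com/233-prog/test | Poker Program V2/Input_tuple.py | validate_no_duplicates
-- ===== SOURCE A (Python) =====
-- def validate_no_duplicates(user_cards, community_cards):
--     all_cards = user_cards + community_cards
--     seen_cards = set()
--
--     for card in all_cards:
--         if card in seen_cards:
--             return False
--         seen_cards.add(card)
--
--     return True
-- ===== SOURCE B (Python) =====
-- def validate_no_duplicates(user_cards, community_cards):
--     cards = sorted(user_cards + community_cards)
--     return all(a != b for a, b in zip(cards, cards[1:]))
-- ===== Notes on version B (the rewrite author's own statement) =====
-- stated objective: alternative
-- what changed: Replaced A's incremental seen-set loop with early exit by sorting the combined list and checking that no two adjacent cards are equal (duplicates are adjacent after sorting), using no set at all.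
import Mathlib
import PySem

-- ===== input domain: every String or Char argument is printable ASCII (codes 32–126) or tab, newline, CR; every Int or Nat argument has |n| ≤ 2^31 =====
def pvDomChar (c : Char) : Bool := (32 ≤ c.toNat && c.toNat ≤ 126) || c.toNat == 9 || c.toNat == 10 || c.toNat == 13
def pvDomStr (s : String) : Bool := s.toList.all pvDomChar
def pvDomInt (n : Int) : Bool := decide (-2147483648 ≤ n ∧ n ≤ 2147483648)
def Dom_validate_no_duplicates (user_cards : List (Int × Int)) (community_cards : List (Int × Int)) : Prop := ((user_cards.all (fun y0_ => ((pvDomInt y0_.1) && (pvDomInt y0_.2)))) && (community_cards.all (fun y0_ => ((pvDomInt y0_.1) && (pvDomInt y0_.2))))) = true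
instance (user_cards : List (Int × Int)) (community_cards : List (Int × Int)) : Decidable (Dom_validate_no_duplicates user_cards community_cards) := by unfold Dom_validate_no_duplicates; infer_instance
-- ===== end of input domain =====

-- B sorts the combined list and checks that no two adjacent cards are equal
-- (after sorting, duplicates are adjacent) instead of A's seen-set loop; objective: alternative.

-- ===== PORT A =====
-- the 'for card in all_cards' loop with its early 'return False'
def pvLoopA_validate_no_duplicates : List (Int × Int) → PySem.Set (Int × Int) → Bool
  | [], _ => true
  | card :: rest, seen_cards =>
      if PySem.Set.contains seen_cards card then false
      else pvLoopA_validate_no_duplicates rest (PySem.Set.add seen_cards card)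

def validate_no_duplicates (user_cards : List (Int × Int)) (community_cards : List (Int × Int)) : Bool :=
  let all_cards := user_cards ++ community_cards
  pvLoopA_validate_no_duplicates all_cards PySem.Set.empty

-- ===== PORT B =====
-- cards = sorted(user_cards + community_cards); all(a != b for a, b in zip(cards, cards[1:]))
def validate_no_duplicates_alt (user_cards : List (Int × Int)) (community_cards : List (Int × Int)) : Bool :=
  let cards := PySem.List.sorted2 (user_cards ++ community_cards) (fun x => x.1) (fun x => x.2)
  (cards.zip (cards.drop 1)).all (fun p => p.1 != p.2)

-- ===== PRECONDITION & SPEC =====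
def Spec_validate_no_duplicates (user_cards : List (Int × Int)) (community_cards : List (Int × Int)) (out : Bool) : Prop := out = validate_no_duplicates_alt user_cards community_cards
instance (user_cards : List (Int × Int)) (community_cards : List (Int × Int)) (out : Bool) : Decidable (Spec_validate_no_duplicates user_cards community_cards out) := by unfold Spec_validate_no_duplicates; infer_instance

-- ===== CLAIM (what is proved, stated in full; the proofs are below) =====
def Claim_equal_validate_no_duplicates : Prop := ∀ (user_cards : List (Int × Int)) (community_cards : List (Int × Int)), Dom_validate_no_duplicates user_cards community_cards → Spec_validate_no_duplicates user_cards community_cards (validate_no_duplicates user_cards community_cards)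

-- ===== LEMMAS AND PROOFS =====

-- the lexicographic 'before' comparison sorted2 uses for the keys fst, snd
def pvLt (a b : Int × Int) : Bool :=
  decide (a.1 < b.1) || (!decide (b.1 < a.1) && decide (a.2 < b.2))

theorem pvLt_asymm {a b : Int × Int} (h : pvLt a b = true) : pvLt b a = false := by
  simp [pvLt] at *; omega

theorem pvLt_trans {a b c : Int × Int} (h1 : pvLt a b = true) (h2 : pvLt b c = true) :
    pvLt a c = true := by
  simp [pvLt] at *; omega

theorem pvEq_of_not_lt {a b : Int × Int} (h1 : pvLt a b = false) (h2 : pvLt b a = false) :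
    a = b := by
  simp [pvLt] at h1 h2
  have : a.1 = b.1 ∧ a.2 = b.2 := by omega
  exact Prod.ext this.1 this.2

-- insertBy with pvLt preserves sortedness (Pairwise of the non-strict order)
theorem pvInsertBy_pairwise (x : Int × Int) (l : List (Int × Int))
    (h : l.Pairwise (fun a b => pvLt b a = false)) :
    (PySem.List.insertBy pvLt x l).Pairwise (fun a b => pvLt b a = false) := by
  induction l with
  | nil => simp [PySem.List.insertBy]
  | cons y ys ih =>
      rcases List.pairwise_cons.mp h with ⟨hy, hys⟩
      by_cases hxy : pvLt x y = true
      · simp only [PySem.List.insertBy, hxy, if_true]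
        refine List.pairwise_cons.mpr ⟨?_, h⟩
        intro z hz
        rcases List.mem_cons.mp hz with rfl | hz
        · exact pvLt_asymm hxy
        · -- z ∈ ys; if pvLt z x then pvLt z y, contradicting hy z
          by_contra hzx
          have hzx' : pvLt z x = true := by
            cases hval : pvLt z x with
            | false => exact absurd hval hzx
            | true => rfl
          have := pvLt_trans hzx' hxy
          have := hy z hz
          simp_all
      · have hxy' : pvLt x y = false := by
          cases hval : pvLt x y with
          | false => rfl
          | true => exact absurd hval hxy
        rw [show PySem.List.insertBy pvLt x (y :: ys) = y :: PySem.List.insertBy pvLt x ys from by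
          simp [PySem.List.insertBy, hxy']]
        refine List.pairwise_cons.mpr ⟨?_, ih hys⟩
        intro z hz
        have hz' := (PySem.List.mem_insertBy (before := pvLt) (x := x) (ys := ys) (y := z)).mp hz
        rcases hz' with rfl | hz'
        · exact hxy'
        · exact hy z hz'

theorem pvSortFold_pairwise (xs : List (Int × Int)) (acc : List (Int × Int))
    (h : acc.Pairwise (fun a b => pvLt b a = false)) :
    (xs.foldl (fun acc x => PySem.List.insertBy pvLt x acc) acc).Pairwise
      (fun a b => pvLt b a = false) := by
  induction xs generalizing acc with
  | nil => simpa
  | cons x rest ih => exact ih _ (pvInsertBy_pairwise x acc h)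

theorem pvSorted2_eq_fold (xs : List (Int × Int)) :
    PySem.List.sorted2 xs (fun x => x.1) (fun x => x.2) =
      xs.foldl (fun acc x => PySem.List.insertBy pvLt x acc) [] := rfl

theorem pvSorted2_pairwise (xs : List (Int × Int)) :
    (PySem.List.sorted2 xs (fun x => x.1) (fun x => x.2)).Pairwise
      (fun a b => pvLt b a = false) := by
  rw [pvSorted2_eq_fold]
  exact pvSortFold_pairwise xs [] (by simp)

-- the adjacent-pairs check of B is exactly IsChain (· ≠ ·)
theorem pvZipAll_iff_chain' (ys : List (Int × Int)) :
    ((ys.zip (ys.drop 1)).all (fun p => p.1 != p.2)) = true ↔ ys.IsChain (· ≠ ·) := by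
  induction ys with
  | nil => simp
  | cons a t ih =>
      cases t with
      | nil => simp
      | cons b t' =>
          simp only [List.drop_succ_cons, List.drop_zero, List.zip_cons_cons, List.all_cons,
            Bool.and_eq_true, List.isChain_cons_cons, bne_iff_ne, ne_eq]
          exact and_congr Iff.rfl ih

-- on a sorted list, adjacent-distinct is the same as Nodup
theorem pvNodup_of_chain' (ys : List (Int × Int))
    (hs : ys.Pairwise (fun a b => pvLt b a = false))
    (hc : ys.IsChain (· ≠ ·)) : ys.Nodup := by
  induction ys with
  | nil => simp
  | cons a t ih =>
      rcases List.pairwise_cons.mp hs with ⟨ha, ht⟩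
      have hct : t.IsChain (· ≠ ·) := hc.tail
      refine List.nodup_cons.mpr ⟨?_, ih ht hct⟩
      cases t with
      | nil => simp
      | cons b t' =>
          intro hmem
          have hab : a ≠ b := (List.isChain_cons_cons.mp hc).1
          rcases List.mem_cons.mp hmem with rfl | hmem'
          · exact hab rfl
          · -- a ∈ t' : pvLt b a = false (from ha) and pvLt a b = false (from Pairwise t) force a = b
            rcases List.pairwise_cons.mp ht with ⟨hb, _⟩
            exact hab (pvEq_of_not_lt (hb a hmem') (ha b (by simp)))

theorem pvChain'_of_nodup (ys : List (Int × Int)) (h : ys.Nodup) : ys.IsChain (· ≠ ·) :=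
  List.Pairwise.isChain h

-- A's loop returns true iff the remaining cards are distinct and unseen
theorem pvLoopA_iff (xs : List (Int × Int)) (seen : PySem.Set (Int × Int)) :
    pvLoopA_validate_no_duplicates xs seen = true ↔ xs.Nodup ∧ ∀ x ∈ xs, x ∉ seen := by
  induction xs generalizing seen with
  | nil => simp [pvLoopA_validate_no_duplicates]
  | cons card rest ih =>
      by_cases h : PySem.Set.contains seen card
      · have hmem : card ∈ seen := by simpa using h
        simp only [pvLoopA_validate_no_duplicates, h, if_true]
        constructor
        · intro hfalse; cases hfalse
        · rintro ⟨-, hall⟩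
          exact absurd hmem (hall card (by simp))
      · have hfalse : PySem.Set.contains seen card = false := by simpa using h
        have hnmem : card ∉ seen := by simpa using h
        simp only [pvLoopA_validate_no_duplicates, hfalse]
        rw [if_neg (by simp)]
        rw [ih]
        constructor
        · rintro ⟨hnd, hall⟩
          refine ⟨List.nodup_cons.mpr ⟨?_, hnd⟩, ?_⟩
          · intro hin
            have := hall card hin
            simp [PySem.Set.mem_add] at this
          · intro x hx
            rcases List.mem_cons.mp hx with rfl | hx'
            · exact hnmem
            · intro hxs
              exact (hall x hx') (by simp [PySem.Set.mem_add, hxs])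
        · rintro ⟨hnd, hall⟩
          rcases List.nodup_cons.mp hnd with ⟨hcr, hrd⟩
          refine ⟨hrd, ?_⟩
          intro x hx hxin
          rw [PySem.Set.mem_add] at hxin
          rcases hxin with hxin | rfl
          · exact (hall x (by simp [hx])) hxin
          · exact hcr hx

-- ===== VERDICT (by name: the statement is the Claim_ definition above) =====
theorem validate_no_duplicates_spec : Claim_equal_validate_no_duplicates := by
  intro u c _
  unfold Spec_validate_no_duplicates validate_no_duplicates validate_no_duplicates_alt
  rw [Bool.eq_iff_iff]
  rw [pvLoopA_iff, pvZipAll_iff_chain']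
  have hperm := PySem.List.sorted2_perm (u ++ c) (fun x : Int × Int => x.1)
    (fun x : Int × Int => x.2) false
  have hpw := pvSorted2_pairwise (u ++ c)
  constructor
  · rintro ⟨hnd, -⟩
    exact pvChain'_of_nodup _ (hperm.nodup_iff.mpr hnd)
  · intro hch
    refine ⟨hperm.nodup_iff.mp (pvNodup_of_chain' _ hpw hch), ?_⟩
    intro x _ hx
    simp [PySem.Set.empty] at hx
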